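-- pv_equiv track=rewrite | github.com/BobbyZhouZijian/ProbablyApproximateShapleyFairness | tools/utils.py | rearrange_results_by_cardinality
-- ===== SOURCE A (Python) =====
-- def rearrange_results_by_cardinality(idx, results):
--     mcs = []
--     for result in results:
--         mc_with_cardinality = result[idx]
--         for mc, card in mc_with_cardinality:
--             if card >= len(mcs):
--                 for j in range(len(mcs), card + 1):
--                     mcs.append([])
--             mcs[card].append(mc)
--     return mcs
-- ===== SOURCE B (Python) =====
-- def rearrange_results_by_cardinality(idx, results):
--     entries = [e for result in results for e in result[idx]]
--     if not entries:
--         return []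
--     max_card = max(card for _, card in entries)
--     return [[mc for mc, card in entries if card == c]
--             for c in range(max_card + 1)]
-- ===== Notes on version B (the rewrite author's own statement) =====
-- stated objective: alternative
-- what changed: B builds the output bucket-by-bucket: it flattens the entries, finds the maximum cardinality, and produces bucket c as one filter pass selecting the entries with cardinality c, instead of A's single dispatch pass that grows a mutable bucket list on demand and appends each entry into its bucket.
-- outside the precondition, e.g. on rearrange_results_by_cardinality(0, [[[(1, 0), (2, -1), (3, 2)]]]): A returns [[1, 2], [], [3]], B returns [[1], [], [3]]
import Mathlib
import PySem

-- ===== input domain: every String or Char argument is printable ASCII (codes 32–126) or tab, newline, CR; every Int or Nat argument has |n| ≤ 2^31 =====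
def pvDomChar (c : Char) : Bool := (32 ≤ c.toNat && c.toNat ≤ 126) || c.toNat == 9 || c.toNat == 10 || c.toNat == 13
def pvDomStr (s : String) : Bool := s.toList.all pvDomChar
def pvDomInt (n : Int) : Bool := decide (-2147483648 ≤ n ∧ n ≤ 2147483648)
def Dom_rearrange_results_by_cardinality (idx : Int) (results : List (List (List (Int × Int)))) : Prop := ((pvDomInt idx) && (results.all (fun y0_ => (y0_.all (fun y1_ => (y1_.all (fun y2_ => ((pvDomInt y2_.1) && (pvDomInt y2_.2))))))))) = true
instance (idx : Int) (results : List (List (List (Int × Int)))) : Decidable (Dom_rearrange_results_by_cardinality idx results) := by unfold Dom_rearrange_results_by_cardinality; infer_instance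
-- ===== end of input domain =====

-- B rebuilds the result bucket-by-bucket (one filter pass per cardinality over the flattened
-- entries) instead of A's dispatch pass over a grow-on-demand mutable bucket list; same values
-- on Pre_, traded for a per-bucket rescan.

-- ===== PORT A =====
-- one entry of A's outer double loop: grow mcs up to card+1 with empty buckets, then append mc to
-- mcs[card] (with Python's negative-index wraparound; a still-out-of-range index, where Python raises
-- IndexError, is outside Pre_ and modify leaves the list unchanged there)
def pvStepA (mcs : List (List Int)) (p : Int × Int) : List (List Int) :=
  let grown := if (mcs.length : Int) ≤ p.2
    then (PySem.List.pyRange (mcs.length : Int) (p.2 + 1) 1).foldl (fun acc _ => acc ++ [([] : List Int)]) mcs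
    else mcs
  grown.modify ((if p.2 < 0 then (grown.length : Int) + p.2 else p.2).toNat) (fun b => b ++ [p.1])

def rearrange_results_by_cardinality (idx : Int) (results : List (List (List (Int × Int)))) : List (List Int) :=
  results.foldl (fun mcs result =>
    ((PySem.List.pyGet? result idx).getD []).foldl pvStepA mcs) []

-- ===== PORT B =====
def rearrange_results_by_cardinality_alt (idx : Int) (results : List (List (List (Int × Int)))) : List (List Int) :=
  let entries := results.flatMap (fun result => (PySem.List.pyGet? result idx).getD [])
  match entries with
  | [] => []
  | e :: rest =>
    let maxCard := rest.foldl (fun a p => max a p.2) e.2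
    (PySem.List.pyRange 0 (maxCard + 1) 1).map
      (fun c => (entries.filter (fun p => p.2 == c)).map (·.1))

-- ===== PRECONDITION & SPEC =====
-- Pre_ excludes out-of-range idx, on which A raises IndexError, and negative cardinalities, on which
-- A's negative-index wraparound into the partially-grown bucket list is accidental (and A raises
-- IndexError when the bucket list is still empty there).
def Pre_rearrange_results_by_cardinality (idx : Int) (results : List (List (List (Int × Int)))) : Prop :=
  ∀ result ∈ results, PySem.Raise.InRange result.length idx ∧
    ∀ p ∈ (PySem.List.pyGet? result idx).getD [], 0 ≤ p.2
instance (idx : Int) (results : List (List (List (Int × Int)))) : Decidable (Pre_rearrange_results_by_cardinality idx results) := by unfold Pre_rearrange_results_by_cardinality; infer_instance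

def pvWitness_rearrange_results_by_cardinality : Int × (List (List (List (Int × Int)))) :=
  (0, [[[(1, 0), (2, 1)]], [[(4, 0)]]])

def Spec_rearrange_results_by_cardinality (idx : Int) (results : List (List (List (Int × Int)))) (out : List (List Int)) : Prop := out = rearrange_results_by_cardinality_alt idx results
instance (idx : Int) (results : List (List (List (Int × Int)))) (out : List (List Int)) : Decidable (Spec_rearrange_results_by_cardinality idx results out) := by unfold Spec_rearrange_results_by_cardinality; infer_instance

-- ===== CLAIM (what is proved, stated in full; the proofs are below) =====
def Claim_equal_rearrange_results_by_cardinality : Prop := ∀ (idx : Int) (results : List (List (List (Int × Int)))), Dom_rearrange_results_by_cardinality idx results → Pre_rearrange_results_by_cardinality idx results → Spec_rearrange_results_by_cardinality idx results (rearrange_results_by_cardinality idx results)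

-- ===== LEMMAS AND PROOFS =====

-- pad a bucket list on the right with empty buckets up to length n
def pvPad (l : List (List Int)) (n : Nat) : List (List Int) := l ++ List.replicate (n - l.length) []
-- the dispatch step A performs once the bucket list is long enough
def pvFill (l : List (List Int)) (p : Int × Int) : List (List Int) :=
  l.modify ((if p.2 < 0 then (l.length : Int) + p.2 else p.2).toNat) (fun b => b ++ [p.1])
-- running maximum of card+1 over the entries, started at n
def pvM (entries : List (Int × Int)) (n : Nat) : Nat := entries.foldl (fun a p => max a (p.2.toNat + 1)) n

theorem pv_modify_append {α : Type} (l l' : List α) (i : Nat) (f : α → α) (h : i < l.length) :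
    (l ++ l').modify i f = l.modify i f ++ l' := by
  induction l generalizing i with
  | nil => simp at h
  | cons a t ih =>
    cases i with
    | zero => simp [List.modify]
    | succ j =>
      simp only [List.cons_append, List.modify_cons, Nat.succ_ne_zero, if_false, Nat.add_sub_cancel]
      rw [ih j (by simpa using h)]

theorem pv_pad_length (l : List (List Int)) (n : Nat) : (pvPad l n).length = max l.length n := by
  simp [pvPad]; omega

theorem pv_pad_pad (l : List (List Int)) (a b : Nat) : pvPad (pvPad l a) b = pvPad l (max a b) := by
  simp only [pvPad, List.append_assoc, List.length_append, List.length_replicate]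
  rw [← List.replicate_add]
  have : a - l.length + (b - (l.length + (a - l.length))) = max a b - l.length := by omega
  rw [this]

theorem pv_pad_self (l : List (List Int)) : pvPad l l.length = l := by
  simp [pvPad]

theorem pv_fill_length (l : List (List Int)) (p : Int × Int) : (pvFill l p).length = l.length :=
  List.length_modify ..

theorem pv_pad_fill (l : List (List Int)) (p : Int × Int) (n : Nat) (hp : 0 ≤ p.2)
    (h : p.2.toNat < l.length) : pvPad (pvFill l p) n = pvFill (pvPad l n) p := by
  have hneg : ¬ p.2 < 0 := by omega
  simp [pvPad, pvFill, hneg, pv_modify_append _ _ _ _ h]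

theorem pv_le_pvM (entries : List (Int × Int)) (n : Nat) : n ≤ pvM entries n := by
  induction entries generalizing n with
  | nil => simp [pvM]
  | cons e t ih => calc n ≤ max n (e.2.toNat + 1) := le_max_left ..
                     _ ≤ pvM t _ := ih _

theorem pv_grow_eq (xs : List Int) (mcs : List (List Int)) :
    xs.foldl (fun acc _ => acc ++ [([] : List Int)]) mcs = mcs ++ List.replicate xs.length [] := by
  induction xs generalizing mcs with
  | nil => simp
  | cons x t ih => simp [List.foldl_cons, ih, List.append_assoc, List.replicate_succ]

theorem pv_stepA_eq (mcs : List (List Int)) (p : Int × Int) (hp : 0 ≤ p.2) :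
    pvStepA mcs p = pvFill (pvPad mcs (max mcs.length (p.2.toNat + 1))) p := by
  have hneg : ¬ p.2 < 0 := by omega
  unfold pvStepA pvFill pvPad
  simp only [hneg, if_false]
  split
  · rename_i h
    rw [pv_grow_eq, PySem.List.length_pyRange_one]
    have : (p.2 + 1 - (mcs.length : Int)).toNat = max mcs.length (p.2.toNat + 1) - mcs.length := by
      omega
    rw [this]
  · rename_i h
    have : max mcs.length (p.2.toNat + 1) - mcs.length = 0 := by omega
    simp [this]

theorem pv_loopA_eq_fill (entries : List (Int × Int)) (h : ∀ p ∈ entries, 0 ≤ p.2) (mcs : List (List Int)) :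
    entries.foldl pvStepA mcs = entries.foldl pvFill (pvPad mcs (pvM entries mcs.length)) := by
  induction entries generalizing mcs with
  | nil => simp [pvM, pv_pad_self]
  | cons e t ih =>
    have he : 0 ≤ e.2 := h e (by simp)
    have ht : ∀ p ∈ t, 0 ≤ p.2 := fun p hp => h p (by simp [hp])
    rw [List.foldl_cons, pv_stepA_eq mcs e he, ih ht]
    set m1 := max mcs.length (e.2.toNat + 1) with hm1
    have hlen : (pvFill (pvPad mcs m1) e).length = m1 := by
      rw [pv_fill_length, pv_pad_length]; omega
    rw [hlen]
    have hM : m1 ≤ pvM t m1 := pv_le_pvM t m1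
    have hidx : e.2.toNat < (pvFill (pvPad mcs m1) e).length := by
      rw [hlen]; omega
    rw [show pvPad (pvFill (pvPad mcs m1) e) (pvM t m1)
          = pvFill (pvPad (pvPad mcs m1) (pvM t m1)) e from
        pv_pad_fill _ _ _ he (by rw [pv_fill_length, pv_pad_length] at hidx; rw [pv_pad_length]; omega),
      pv_pad_pad]
    have : max m1 (pvM t m1) = pvM t m1 := by omega
    rw [this]
    have : pvM (e :: t) mcs.length = pvM t m1 := by simp [pvM, hm1]
    rw [this, List.foldl_cons]

theorem pv_pvM_eq_max (rest : List (Int × Int)) (c : Int) (hc : 0 ≤ c) (h : ∀ p ∈ rest, 0 ≤ p.2) :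
    pvM rest (c.toNat + 1) = (rest.foldl (fun a p => max a p.2) c).toNat + 1 := by
  induction rest generalizing c with
  | nil => simp [pvM]
  | cons e t ih =>
    have he : 0 ≤ e.2 := h e (by simp)
    have ht : ∀ p ∈ t, 0 ≤ p.2 := fun p hp => h p (by simp [hp])
    have hmax : max (c.toNat + 1) (e.2.toNat + 1) = (max c e.2).toNat + 1 := by omega
    simp only [pvM, List.foldl_cons] at *
    rw [hmax]
    exact ih (max c e.2) (le_max_of_le_left hc) ht

theorem pv_pad_nil (n : Nat) : pvPad [] n = List.replicate n [] := by simp [pvPad]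

theorem pv_le_foldl_max (t : List (Int × Int)) (c : Int) :
    c ≤ t.foldl (fun a p => max a p.2) c := by
  induction t generalizing c with
  | nil => simp
  | cons x s ih => exact le_trans (le_max_left c x.2) (ih (max c x.2))

theorem pv_foldl_fill_length (entries : List (Int × Int)) (mcs : List (List Int)) :
    (entries.foldl pvFill mcs).length = mcs.length := by
  induction entries generalizing mcs with
  | nil => rfl
  | cons e t ih => rw [List.foldl_cons, ih, pv_fill_length]

theorem pv_fill_getElem (l : List (List Int)) (p : Int × Int) (hp : 0 ≤ p.2) (c : Nat)
    (hc : c < l.length) :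
    (pvFill l p)[c]'(by rw [pv_fill_length]; exact hc)
      = if p.2 == (c : Int) then l[c] ++ [p.1] else l[c] := by
  have hneg : ¬ p.2 < 0 := by omega
  unfold pvFill
  simp only [hneg, if_false]
  rw [List.getElem_modify]
  by_cases hb : p.2 = (c : Int)
  · have h1 : p.2.toNat = c := by omega
    simp [hb]
  · have h1 : p.2.toNat ≠ c := by omega
    simp [h1, hb]

theorem pv_fill_getD (l : List (List Int)) (p : Int × Int) (hp : 0 ≤ p.2) (c : Nat)
    (hc : c < l.length) :
    (pvFill l p).getD c []
      = if p.2 == (c : Int) then l.getD c [] ++ [p.1] else l.getD c [] := by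
  rw [List.getD_eq_getElem _ _ (show c < (pvFill l p).length by rw [pv_fill_length]; exact hc),
    pv_fill_getElem l p hp c hc, List.getD_eq_getElem _ _ hc]

-- the bucket at index c of the dispatch fold is the filter of the entries with cardinality c
theorem pv_foldl_fill_getD (entries : List (Int × Int)) (mcs : List (List Int))
    (h : ∀ p ∈ entries, 0 ≤ p.2) (c : Nat) (hc : c < mcs.length) :
    (entries.foldl pvFill mcs).getD c []
      = mcs.getD c [] ++ (entries.filter (fun p => p.2 == (c : Int))).map (·.1) := by
  induction entries generalizing mcs with
  | nil => simp
  | cons e t ih =>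
    have he : 0 ≤ e.2 := h e (by simp)
    have ht : ∀ p ∈ t, 0 ≤ p.2 := fun p hp => h p (by simp [hp])
    have hc' : c < (pvFill mcs e).length := by rw [pv_fill_length]; exact hc
    rw [List.foldl_cons, ih (pvFill mcs e) ht hc', pv_fill_getD mcs e he c hc, List.filter_cons]
    by_cases hb : e.2 = (c : Int)
    · simp [hb]
    · simp [hb]

-- ===== VERDICT (by name: the statement is the Claim_ definition above) =====
theorem rearrange_results_by_cardinality_spec : Claim_equal_rearrange_results_by_cardinality := by
  intro idx results _ hPre
  unfold Spec_rearrange_results_by_cardinality rearrange_results_by_cardinality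
    rearrange_results_by_cardinality_alt
  rw [← List.foldl_flatMap]
  have hpos : ∀ p ∈ results.flatMap (fun result => (PySem.List.pyGet? result idx).getD []), 0 ≤ p.2 := by
    intro p hp
    rw [List.mem_flatMap] at hp
    obtain ⟨r, hr, hpr⟩ := hp
    exact (hPre r hr).2 p hpr
  revert hpos
  generalize results.flatMap (fun result => (PySem.List.pyGet? result idx).getD []) = entries
  intro hpos
  rw [pv_loopA_eq_fill entries hpos []]
  cases entries with
  | nil => simp [pvM, pvPad]
  | cons e rest =>
    have he : 0 ≤ e.2 := hpos e (by simp)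
    have hrest : ∀ p ∈ rest, 0 ≤ p.2 := fun p hp => hpos p (by simp [hp])
    have h1 : pvM (e :: rest) ([] : List (List Int)).length = pvM rest (max 0 (e.2.toNat + 1)) := rfl
    set maxCard := rest.foldl (fun a p => max a p.2) e.2 with hmc
    have hmc0 : 0 ≤ maxCard := le_trans he (hmc ▸ pv_le_foldl_max rest e.2)
    have hM : pvM (e :: rest) ([] : List (List Int)).length = maxCard.toNat + 1 := by
      rw [h1, Nat.zero_max, pv_pvM_eq_max rest e.2 he hrest]
    rw [hM, pv_pad_nil]
    -- both sides now have length maxCard.toNat + 1; compare element-wise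
    apply List.ext_getElem
    · rw [pv_foldl_fill_length, List.length_replicate, List.length_map,
        PySem.List.length_pyRange_one]
      omega
    · intro i h1i h2i
      have hi : i < maxCard.toNat + 1 := by
        rwa [pv_foldl_fill_length, List.length_replicate] at h1i
      rw [← List.getD_eq_getElem _ [] h1i,
        pv_foldl_fill_getD (e :: rest) _ hpos i (by simpa using hi),
        List.getD_eq_getElem _ [] (by simpa using hi), List.getElem_replicate, List.nil_append,
        List.getElem_map]
      have hr : ((PySem.List.pyRange 0 (maxCard + 1) 1)[i]'(by
          simpa using h2i)) = (0 : Int) + i := PySem.List.getElem_pyRange_one ..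
      rw [hr]
      norm_num
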